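-- pv_equiv track=rewrite | github.com/juliuscoburger/VCSolver | preprocess.py | alternatingBFS
-- ===== SOURCE A (Python) =====
-- def alternatingBFS(G, L, R, M):
--     """
--     :param G:
--     :param L:
--     :param R:
--     :param M:
--     :return:
--     """
--     visited = []
--     Q = [v for v in L if v in G and v not in M]
--     while len(Q) != 0:
--         v = Q[0]
--         if v not in visited:
--             visited.append(v)
--
--             if v in L:
--                 neigh = [n for n in G[v] if G[v] != n]
--
--             if v in R:
--                 neigh = [M[v]]
--
--             Q.extend(neigh)
--         Q.remove(v)
--     return visited
-- ===== SOURCE B (Python) =====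
-- def alternatingBFS(G, L, R, M):
--     order, seen = [], set()
--     frontier = [v for v in L if v in G and v not in M]
--     while frontier:
--         layer = []
--         for v in frontier:
--             if v not in seen:
--                 seen.add(v)
--                 layer.append(v)
--         order += layer
--         frontier = [w for v in layer
--                     for w in ([M[v]] if v in R else G[v] if v in L else [])]
--     return order
-- ===== Notes on version B (the rewrite author's own statement) =====
-- stated objective: alternative
-- what changed: B has no vertex queue at all: it computes the traversal level by level (dedup the frontier into a layer, append the whole layer to the output, flat-map the successor rule over the layer to get the next frontier); Pre_ excludes exactly the inputs on which A raises KeyError (reachability-based), so every input A returns on is covered and proved equal.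
import Mathlib
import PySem

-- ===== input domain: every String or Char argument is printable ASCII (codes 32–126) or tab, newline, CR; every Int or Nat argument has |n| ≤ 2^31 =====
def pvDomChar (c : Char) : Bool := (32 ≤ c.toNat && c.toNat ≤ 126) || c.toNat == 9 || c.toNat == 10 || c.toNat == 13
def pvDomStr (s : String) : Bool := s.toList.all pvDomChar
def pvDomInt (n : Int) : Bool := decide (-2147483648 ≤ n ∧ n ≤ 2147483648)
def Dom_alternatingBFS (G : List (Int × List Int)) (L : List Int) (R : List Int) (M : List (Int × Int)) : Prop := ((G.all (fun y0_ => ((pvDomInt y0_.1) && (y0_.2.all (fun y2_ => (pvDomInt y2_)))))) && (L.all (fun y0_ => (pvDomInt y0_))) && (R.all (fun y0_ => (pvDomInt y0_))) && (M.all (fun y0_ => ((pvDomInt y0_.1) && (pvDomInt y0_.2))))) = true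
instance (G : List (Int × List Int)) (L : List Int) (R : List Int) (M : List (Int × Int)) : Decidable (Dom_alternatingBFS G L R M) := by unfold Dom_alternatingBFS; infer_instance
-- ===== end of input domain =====

-- B replaces A's single mutable queue (with list-scan visited test and Q.remove) by a level-by-level frontier expansion
-- (dedup frontier into a layer, emit the layer, flat-map the successor rule for the next frontier); objective: alternative.


-- Python dict lookup on an association list: value of the first matching key ('v in d' = (pvLookup d v).isSome)
def pvLookup {ν : Type} (d : List (Int × ν)) (k : Int) : Option ν :=
  (d.find? (fun p => decide (p.1 = k))).map Prod.snd

-- all vertex values that can ever be appended to a frontier/queue (used for termination measures and Pre_'s closure bound)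
def pvVerts (G : List (Int × List Int)) (L : List Int) (M : List (Int × Int)) : List Int :=
  L ++ G.flatMap (fun p => p.2) ++ M.map (fun p => p.2)

-- termination universe: pvVerts plus the dummy default 0 the total-form lookups can produce outside Pre_
def pvUniv (G : List (Int × List Int)) (L : List Int) (M : List (Int × Int)) : List Int :=
  0 :: pvVerts G L M

-- strict decrease of a countP when one counted element stops satisfying the predicate (used by the loops' decreasing_by)
theorem pv_countP_strict {l : List Int} {p q : Int → Bool} (h : ∀ x, q x = true → p x = true)
    {a : Int} (ha : a ∈ l) (hpa : p a = true) (hqa : q a = false) :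
    l.countP q < l.countP p := by
  induction l with
  | nil => cases ha
  | cons b t ih =>
    rcases List.mem_cons.1 ha with rfl | hb
    · have hle : t.countP q ≤ t.countP p := List.countP_mono_left (fun x _ hx => h x hx)
      simp [hpa, hqa]; omega
    · have := ih hb
      by_cases hqb : q b = true
      · have hpb := h b hqb
        simp [hpb, hqb]; omega
      · simp only [List.countP_cons, Bool.not_eq_true] at *
        simp [hqb]; split <;> omega

-- first-match lookup hits an element of the association list
theorem pvLookup_mem {ν : Type} {d : List (Int × ν)} {k : Int} {w : ν}
    (h : pvLookup d k = some w) : ∃ a, (a, w) ∈ d := by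
  unfold pvLookup at h
  rcases Option.map_eq_some_iff.1 h with ⟨p, hp, hw⟩
  exact ⟨p.1, by rw [show (p.1, w) = p from by cases p; simp_all]; exact List.mem_of_find?_eq_some hp⟩

-- the two total-form lookups only produce values inside the termination universe
theorem pv_mget_mem (G : List (Int × List Int)) (L : List Int) (M : List (Int × Int)) (v : Int) :
    (pvLookup M v).getD 0 ∈ pvUniv G L M := by
  cases hM : pvLookup M v with
  | none => simp [pvUniv]
  | some w =>
    obtain ⟨a, ha⟩ := pvLookup_mem hM
    simp only [pvUniv, pvVerts, Option.getD_some, List.mem_cons, List.mem_append, List.mem_map]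
    exact Or.inr (Or.inr ⟨(a, w), ha, rfl⟩)

theorem pv_gget_mem (G : List (Int × List Int)) (L : List Int) (M : List (Int × Int)) (v : Int)
    {x : Int} (hx : x ∈ (pvLookup G v).getD []) : x ∈ pvUniv G L M := by
  cases hG : pvLookup G v with
  | none => simp [hG] at hx
  | some l =>
    obtain ⟨a, ha⟩ := pvLookup_mem hG
    have hxl : x ∈ l := by simpa [hG] using hx
    simp only [pvUniv, pvVerts, List.mem_cons, List.mem_append, List.mem_flatMap]
    exact Or.inr (Or.inl (Or.inr ⟨(a, l), ha, hxl⟩))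

-- ===== PORT A =====
-- the while-loop of A; `neigh` is the Python variable that survives across iterations.
-- v = Q[0], so `Q.remove(v)` (after the extend) drops the head; `[n for n in G[v] if G[v] != n]`
-- compares a list with an int, which is always unequal in Python, so the filter condition is `true`.
-- The subset proofs hQ/hN only justify termination; the computation is exactly A's.
def pvLoopA (G : List (Int × List Int)) (L R : List Int) (M : List (Int × Int))
    (Q visited neigh : List Int)
    (hQ : ∀ x ∈ Q, x ∈ pvUniv G L M) (hN : ∀ x ∈ neigh, x ∈ pvUniv G L M) : List Int :=
  match Q with
  | [] => visited
  | v :: rest =>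
    if hv : v ∈ visited then
      pvLoopA G L R M rest visited neigh (fun x hx => hQ x (List.mem_cons_of_mem _ hx)) hN
    else
      let neigh1 := if v ∈ L then ((pvLookup G v).getD []).filter (fun _ => true) else neigh
      let neigh2 := if v ∈ R then [(pvLookup M v).getD 0] else neigh1
      pvLoopA G L R M (rest ++ neigh2) (visited ++ [v]) neigh2
        (by
          intro x hx
          rcases List.mem_append.1 hx with hx | hx
          · exact hQ x (List.mem_cons_of_mem _ hx)
          · simp only [neigh2, neigh1] at hx
            split at hx
            · rcases List.mem_singleton.1 hx with rfl
              exact pv_mget_mem G L M v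
            · split at hx
              · exact pv_gget_mem G L M v (by simpa using hx)
              · exact hN x hx)
        (by
          intro x hx
          simp only [neigh2, neigh1] at hx
          split at hx
          · rcases List.mem_singleton.1 hx with rfl
            exact pv_mget_mem G L M v
          · split at hx
            · exact pv_gget_mem G L M v (by simpa using hx)
            · exact hN x hx)
  termination_by ((pvUniv G L M).countP (fun x => !decide (x ∈ visited)), Q.length)
  decreasing_by
  · exact Prod.Lex.right _ (by simp)
  · apply Prod.Lex.left
    exact pv_countP_strict (q := fun x => !decide (x ∈ visited ++ [v]))
      (by intro x hx; simp at hx ⊢; tauto)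
      (hQ v (List.mem_cons_self ..)) (by simpa using hv) (by simp)

def alternatingBFS (G : List (Int × List Int)) (L : List Int) (R : List Int) (M : List (Int × Int)) : List Int :=
  pvLoopA G L R M (L.filter (fun v => (pvLookup G v).isSome && !(pvLookup M v).isSome)) [] []
    (fun x hx => by simp [pvUniv, pvVerts]; right; left; exact List.mem_of_mem_filter hx)
    (by intro x hx; cases hx)

-- ===== PORT B =====
-- B's successor rule: `[M[v]] if v in R else G[v] if v in L else []` (total form; exact wherever the entry exists)
def pvSucc (G : List (Int × List Int)) (L R : List Int) (M : List (Int × Int)) (v : Int) : List Int :=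
  if v ∈ R then [(pvLookup M v).getD 0] else if v ∈ L then (pvLookup G v).getD [] else []

theorem pvSucc_mem_univ (G : List (Int × List Int)) (L R : List Int) (M : List (Int × Int)) (v : Int)
    {x : Int} (hx : x ∈ pvSucc G L R M v) : x ∈ pvUniv G L M := by
  unfold pvSucc at hx
  split at hx
  · rcases List.mem_singleton.1 hx with rfl
    exact pv_mget_mem G L M v
  · split at hx
    · exact pv_gget_mem G L M v hx
    · cases hx

-- B's inner for-loop over the frontier: first occurrences not yet seen, plus the updated seen set
def pvLayer (seen : PySem.Set Int) (fr : List Int) : List Int × PySem.Set Int :=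
  match fr with
  | [] => ([], seen)
  | v :: rest =>
    if v ∈ seen then pvLayer seen rest
    else
      let p := pvLayer (PySem.Set.add seen v) rest
      (v :: p.1, p.2)

-- membership facts about a layer (needed by pvRounds' termination proof)
theorem pvLayer_mem_snd (seen : PySem.Set Int) (fr : List Int) (x : Int) :
    x ∈ (pvLayer seen fr).2 ↔ x ∈ seen ∨ x ∈ (pvLayer seen fr).1 := by
  induction fr generalizing seen with
  | nil => simp [pvLayer]
  | cons v rest ih =>
    by_cases hv : v ∈ seen
    · simpa [pvLayer, hv] using ih seen
    · simp only [pvLayer, if_neg hv]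
      rw [ih (PySem.Set.add seen v)]
      simp [PySem.Set.mem_add]
      tauto

theorem pvLayer_fst_subset (seen : PySem.Set Int) (fr : List Int) (x : Int)
    (hx : x ∈ (pvLayer seen fr).1) : x ∈ fr ∧ x ∉ seen := by
  induction fr generalizing seen with
  | nil => simp [pvLayer] at hx
  | cons v rest ih =>
    by_cases hv : v ∈ seen
    · simp only [pvLayer, if_pos hv] at hx
      have := ih seen hx
      exact ⟨List.mem_cons_of_mem _ this.1, this.2⟩
    · simp only [pvLayer, if_neg hv] at hx
      rcases List.mem_cons.1 hx with rfl | hx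
      · exact ⟨List.mem_cons_self .., hv⟩
      · have := ih (PySem.Set.add seen v) hx
        refine ⟨List.mem_cons_of_mem _ this.1, fun hs => this.2 ?_⟩
        simp [PySem.Set.mem_add, hs]

-- B's while-loop: emit the layer, flat-map the successor rule over it for the next frontier
def pvRounds (G : List (Int × List Int)) (L R : List Int) (M : List (Int × Int))
    (fr : List Int) (seen : PySem.Set Int) (order : List Int)
    (hfr : ∀ x ∈ fr, x ∈ pvUniv G L M) : List Int :=
  match fr with
  | [] => order
  | v :: rest =>
    pvRounds G L R M
      ((pvLayer seen (v :: rest)).1.flatMap (pvSucc G L R M))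
      (pvLayer seen (v :: rest)).2
      (order ++ (pvLayer seen (v :: rest)).1)
      (by
        intro x hx
        rcases List.mem_flatMap.1 hx with ⟨u, _, hu⟩
        exact pvSucc_mem_univ G L R M u hu)
  termination_by ((pvUniv G L M).countP (fun x => !decide (x ∈ seen)), fr.length)
  decreasing_by
    rcases hL : (pvLayer seen (v :: rest)).1 with _ | ⟨w, ws⟩
    · have hc : ((pvUniv G L M).countP (fun x => !decide (x ∈ (pvLayer seen (v :: rest)).2)))
          = ((pvUniv G L M).countP (fun x => !decide (x ∈ seen))) := by
        apply List.countP_congr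
        intro x _
        have := pvLayer_mem_snd seen (v :: rest) x
        rw [hL] at this
        simp at this
        simp [this]
      rw [hc]
      exact Prod.Lex.right _ (by simp)
    · apply Prod.Lex.left
      have hw1 : w ∈ (pvLayer seen (v :: rest)).1 := by rw [hL]; exact List.mem_cons_self ..
      have hw2 := pvLayer_fst_subset seen (v :: rest) w hw1
      exact pv_countP_strict (q := fun x => !decide (x ∈ (pvLayer seen (v :: rest)).2))
        (by
          intro x hx
          simp only [Bool.not_eq_true', decide_eq_false_iff_not] at hx ⊢
          intro hs
          exact hx (((pvLayer_mem_snd seen (v :: rest) x).2 (Or.inl hs))))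
        (hfr w hw2.1) (by simpa using hw2.2)
        (by simp [(pvLayer_mem_snd seen (v :: rest) w).2 (Or.inr hw1)])

def alternatingBFS_alt (G : List (Int × List Int)) (L : List Int) (R : List Int) (M : List (Int × Int)) : List Int :=
  pvRounds G L R M (L.filter (fun v => (pvLookup G v).isSome && !(pvLookup M v).isSome)) PySem.Set.empty []
    (fun x hx => by simp [pvUniv, pvVerts]; right; left; exact List.mem_of_mem_filter hx)

-- ===== PRECONDITION & SPEC =====
-- closure of the start set (unmatched left vertices present in G) under the successor map, used only by Pre_
def pvReach (G : List (Int × List Int)) (L R : List Int) (M : List (Int × Int)) : List Int :=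
  (fun S => PySem.List.dedup (S ++ S.flatMap (pvSucc G L R M)))^[(pvUniv G L M).length + 2]
    (L.filter (fun v => (pvLookup G v).isSome && !(pvLookup M v).isSome))

-- Pre_ excludes exactly the inputs on which Python A raises KeyError: some vertex reachable by the alternating
-- traversal from the unmatched left start set is in L without a G entry or in R without an M entry.
def Pre_alternatingBFS (G : List (Int × List Int)) (L : List Int) (R : List Int) (M : List (Int × Int)) : Prop :=
  ∀ v ∈ pvReach G L R M, (v ∈ L → (pvLookup G v).isSome = true) ∧ (v ∈ R → (pvLookup M v).isSome = true)
instance (G : List (Int × List Int)) (L : List Int) (R : List Int) (M : List (Int × Int)) : Decidable (Pre_alternatingBFS G L R M) := by unfold Pre_alternatingBFS; infer_instance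

def pvWitness_alternatingBFS : (List (Int × List Int)) × List Int × List Int × (List (Int × Int)) :=
  ([(1, [2])], [1], [2], [(2, 1)])

def Spec_alternatingBFS (G : List (Int × List Int)) (L : List Int) (R : List Int) (M : List (Int × Int)) (out : List Int) : Prop := out = alternatingBFS_alt G L R M
instance (G : List (Int × List Int)) (L : List Int) (R : List Int) (M : List (Int × Int)) (out : List Int) : Decidable (Spec_alternatingBFS G L R M out) := by unfold Spec_alternatingBFS; infer_instance

-- ===== CLAIM (what is proved, stated in full; the proofs are below) =====
def Claim_equal_alternatingBFS : Prop := ∀ (G : List (Int × List Int)) (L : List Int) (R : List Int) (M : List (Int × Int)), Dom_alternatingBFS G L R M → Pre_alternatingBFS G L R M → Spec_alternatingBFS G L R M (alternatingBFS G L R M)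

-- ===== LEMMAS AND PROOFS =====

-- the abstract FIFO traversal both programs compute: pop the head, skip if emitted, else emit and append successors
def pvAbs (G : List (Int × List Int)) (L R : List Int) (M : List (Int × Int))
    (Q vis : List Int) (hQ : ∀ x ∈ Q, x ∈ pvUniv G L M) : List Int :=
  match Q with
  | [] => vis
  | v :: rest =>
    if v ∈ vis then
      pvAbs G L R M rest vis (fun x hx => hQ x (List.mem_cons_of_mem _ hx))
    else
      pvAbs G L R M (rest ++ pvSucc G L R M v) (vis ++ [v])
        (by
          intro x hx
          rcases List.mem_append.1 hx with hx | hx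
          · exact hQ x (List.mem_cons_of_mem _ hx)
          · exact pvSucc_mem_univ G L R M v hx)
  termination_by ((pvUniv G L M).countP (fun x => !decide (x ∈ vis)), Q.length)
  decreasing_by
  · exact Prod.Lex.right _ (by simp)
  · rename_i hv
    apply Prod.Lex.left
    exact pv_countP_strict (q := fun x => !decide (x ∈ vis ++ [v]))
      (by intro x hx; simp at hx ⊢; tauto)
      (hQ v (List.mem_cons_self ..)) (by simpa using hv) (by simp)

-- the proof arguments are irrelevant; only the lists matter
theorem pvAbs_congr (G : List (Int × List Int)) (L R : List Int) (M : List (Int × Int))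
    {Q Q' vis vis' : List Int} (hQQ : Q = Q') (hvv : vis = vis') (h1 h2) :
    pvAbs G L R M Q vis h1 = pvAbs G L R M Q' vis' h2 := by
  subst hQQ; subst hvv; rfl

-- a queue element that already occurs in vis or earlier in the queue can be deleted without changing the result
theorem pvAbs_dup (G : List (Int × List Int)) (L R : List Int) (M : List (Int × Int))
    (Q1 Q2 vis : List Int) (x : Int) (hx : x ∈ vis ∨ x ∈ Q1) (h1 h2) :
    pvAbs G L R M (Q1 ++ x :: Q2) vis h1 = pvAbs G L R M (Q1 ++ Q2) vis h2 := by
  match Q1 with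
  | [] =>
    have hxv : x ∈ vis := hx.resolve_right (by simp)
    show pvAbs G L R M (x :: Q2) vis h1 = pvAbs G L R M Q2 vis h2
    rw [pvAbs]
    simp only [if_pos hxv]
  | v :: Q1' =>
    show pvAbs G L R M (v :: (Q1' ++ x :: Q2)) vis h1 = pvAbs G L R M (v :: (Q1' ++ Q2)) vis h2
    rw [pvAbs, pvAbs]
    by_cases hv : v ∈ vis
    · simp only [if_pos hv]
      exact pvAbs_dup G L R M Q1' Q2 vis x
        (by rcases hx with hx | hx; · exact Or.inl hx
            · rcases List.mem_cons.1 hx with rfl | hx; · exact Or.inl hv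
              · exact Or.inr hx) _ _
    · simp only [if_neg hv]
      have hu1 : ∀ y ∈ Q1' ++ x :: (Q2 ++ pvSucc G L R M v), y ∈ pvUniv G L M := by
        intro y hy
        simp only [List.mem_append, List.mem_cons] at hy
        rcases hy with hy | hy | hy | hy
        · exact h1 y (by simp [hy])
        · exact h1 y (by simp [hy])
        · exact h1 y (by simp [hy])
        · exact pvSucc_mem_univ G L R M v hy
      have hu2 : ∀ y ∈ Q1' ++ (Q2 ++ pvSucc G L R M v), y ∈ pvUniv G L M := by
        intro y hy
        simp only [List.mem_append] at hy
        rcases hy with hy | hy | hy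
        · exact h2 y (by simp [hy])
        · exact h2 y (by simp [hy])
        · exact pvSucc_mem_univ G L R M v hy
      refine Eq.trans (pvAbs_congr G L R M (by simp) rfl _ hu1) (Eq.trans ?_
        (pvAbs_congr G L R M (show Q1' ++ (Q2 ++ pvSucc G L R M v) = (Q1' ++ Q2) ++ pvSucc G L R M v by simp) rfl hu2 _))
      exact pvAbs_dup G L R M Q1' (Q2 ++ pvSucc G L R M v) (vis ++ [v]) x
        (by rcases hx with hx | hx; · exact Or.inl (List.mem_append_left _ hx)
            · rcases List.mem_cons.1 hx with rfl | hx
              · exact Or.inl (by simp)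
              · exact Or.inr hx) hu1 hu2
  termination_by ((pvUniv G L M).countP (fun x => !decide (x ∈ vis)), Q1.length)
  decreasing_by
  · exact Prod.Lex.right _ (by simp)
  · apply Prod.Lex.left
    exact pv_countP_strict (q := fun y => !decide (y ∈ vis ++ [v]))
      (by intro y hy; simp at hy ⊢; tauto)
      (h1 v (List.mem_cons_self ..)) (by simpa using hv) (by simp)

-- a whole block of such duplicates at the end of the queue can be deleted
theorem pvAbs_dups (G : List (Int × List Int)) (L R : List Int) (M : List (Int × Int))
    (Q vis : List Int) : ∀ (E : List Int), (∀ x ∈ E, x ∈ vis ∨ x ∈ Q) → ∀ h1 h2,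
    pvAbs G L R M (Q ++ E) vis h1 = pvAbs G L R M Q vis h2 := by
  intro E
  induction E using List.reverseRecOn with
  | nil => exact fun _ h1 h2 => pvAbs_congr G L R M (by simp) rfl _ _
  | append_singleton E' x ih =>
    intro hE h1 h2
    have h3 : ∀ y ∈ Q ++ E', y ∈ pvUniv G L M := by
      intro y hy; apply h1 y; simp at hy ⊢; tauto
    refine Eq.trans (pvAbs_congr G L R M
      (show Q ++ (E' ++ [x]) = (Q ++ E') ++ x :: [] by simp) rfl h1
      (by intro y hy; apply h1 y; simp at hy ⊢; tauto)) (Eq.trans ?_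
        (ih (fun y hy => hE y (List.mem_append_left _ hy)) h3 h2))
    refine Eq.trans (pvAbs_dup G L R M (Q ++ E') [] vis x ?_ _
      (by intro y hy; apply h3 y; simpa using hy)) (pvAbs_congr G L R M (by simp) rfl _ h3)
    rcases hE x (by simp) with hx | hx
    · exact Or.inl hx
    · exact Or.inr (List.mem_append_left _ hx)

-- A's loop equals the abstract traversal: the stale `neigh` list only ever re-appends elements already in vis or the queue
theorem pvLoopA_eq_abs (G : List (Int × List Int)) (L R : List Int) (M : List (Int × Int))
    (Q vis neigh : List Int) (hQ hN) (hinv : ∀ x ∈ neigh, x ∈ vis ∨ x ∈ Q) :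
    pvLoopA G L R M Q vis neigh hQ hN = pvAbs G L R M Q vis hQ := by
  match Q with
  | [] => rw [pvLoopA, pvAbs]
  | v :: rest =>
    rw [pvLoopA, pvAbs]
    have hrest : ∀ x ∈ rest, x ∈ pvUniv G L M := fun x hx => hQ x (List.mem_cons_of_mem _ hx)
    by_cases hv : v ∈ vis
    · simp only [dif_pos hv, if_pos hv]
      exact pvLoopA_eq_abs G L R M rest vis neigh _ _
        (by intro x hx
            rcases hinv x hx with h | h; · exact Or.inl h
            · rcases List.mem_cons.1 h with rfl | h; · exact Or.inl hv
              · exact Or.inr h)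
    · simp only [dif_neg hv, if_neg hv]
      by_cases hR : v ∈ R
      · simp only [if_pos hR]
        refine Eq.trans (pvLoopA_eq_abs G L R M (rest ++ [(pvLookup M v).getD 0]) (vis ++ [v])
          [(pvLookup M v).getD 0]
          (by intro x hx
              rcases List.mem_append.1 hx with hx | hx
              · exact hrest x hx
              · rcases List.mem_singleton.1 hx with rfl; exact pv_mget_mem G L M v)
          (by intro x hx
              rcases List.mem_singleton.1 hx with rfl; exact pv_mget_mem G L M v)
          (fun x hx => Or.inr (List.mem_append_right _ hx))) ?_
        exact pvAbs_congr G L R M (by simp [pvSucc, hR]) rfl _ _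
      · by_cases hL : v ∈ L
        · simp only [if_neg hR, if_pos hL]
          refine Eq.trans (pvLoopA_eq_abs G L R M
            (rest ++ ((pvLookup G v).getD []).filter (fun _ => true)) (vis ++ [v])
            (((pvLookup G v).getD []).filter (fun _ => true))
            (by intro x hx
                rcases List.mem_append.1 hx with hx | hx
                · exact hrest x hx
                · exact pv_gget_mem G L M v (List.mem_of_mem_filter hx))
            (by intro x hx; exact pv_gget_mem G L M v (List.mem_of_mem_filter hx))
            (fun x hx => Or.inr (List.mem_append_right _ hx))) ?_
          exact pvAbs_congr G L R M (by simp [pvSucc, hR, hL]) rfl _ _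
        · simp only [if_neg hR, if_neg hL]
          refine Eq.trans (pvLoopA_eq_abs G L R M (rest ++ neigh) (vis ++ [v]) neigh
            (by intro x hx
                rcases List.mem_append.1 hx with hx | hx
                · exact hrest x hx
                · exact hN x hx)
            hN
            (fun x hx => Or.inr (List.mem_append_right _ hx))) ?_
          refine Eq.trans (pvAbs_dups G L R M rest (vis ++ [v]) neigh
            (by intro x hx
                rcases hinv x hx with h | h
                · exact Or.inl (List.mem_append_left _ h)
                · rcases List.mem_cons.1 h with rfl | h
                  · exact Or.inl (by simp)
                  · exact Or.inr h) _ hrest) ?_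
          exact pvAbs_congr G L R M (by simp [pvSucc, hR, hL]) rfl _ _
  termination_by ((pvUniv G L M).countP (fun x => !decide (x ∈ vis)), Q.length)
  decreasing_by
  · exact Prod.Lex.right _ (by simp)
  all_goals
    apply Prod.Lex.left
    exact pv_countP_strict (q := fun x => !decide (x ∈ vis ++ [v]))
      (by intro x hx; simp at hx ⊢; tauto)
      (hQ v (List.mem_cons_self ..)) (by simpa using hv) (by simp)

-- processing one frontier of the abstract traversal = emitting the layer and queueing its successors
theorem pvAbs_round (G : List (Int × List Int)) (L R : List Int) (M : List (Int × Int))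
    (fr : List Int) : ∀ (Qtail vis : List Int) (seen : PySem.Set Int),
    (∀ x : Int, x ∈ seen ↔ x ∈ vis) → ∀ h1 h2,
    pvAbs G L R M (fr ++ Qtail) vis h1 =
      pvAbs G L R M (Qtail ++ (pvLayer seen fr).1.flatMap (pvSucc G L R M))
        (vis ++ (pvLayer seen fr).1) h2 := by
  induction fr with
  | nil =>
    intro Qtail vis seen hseen h1 h2
    exact pvAbs_congr G L R M (by simp [pvLayer]) (by simp [pvLayer]) _ _
  | cons v fr' ih =>
    intro Qtail vis seen hseen h1 h2
    show pvAbs G L R M (v :: (fr' ++ Qtail)) vis h1 = _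
    rw [pvAbs]
    by_cases hv : v ∈ seen
    · have hv' : v ∈ vis := (hseen v).1 hv
      simp only [if_pos hv']
      refine Eq.trans (ih Qtail vis seen hseen
        (by intro y hy; apply h1 y; simp at hy ⊢; tauto)
        (by intro y hy; apply h2 y
            simp only [pvLayer, if_pos hv] at hy ⊢
            exact hy)) ?_
      exact pvAbs_congr G L R M (by simp [pvLayer, hv]) (by simp [pvLayer, hv]) _ _
    · have hv' : v ∉ vis := fun h => hv ((hseen v).2 h)
      simp only [if_neg hv']
      have hseen' : ∀ x : Int, x ∈ PySem.Set.add seen v ↔ x ∈ vis ++ [v] := by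
        intro x; simp [PySem.Set.mem_add, hseen x]
      refine Eq.trans (pvAbs_congr G L R M
        (show (fr' ++ Qtail) ++ pvSucc G L R M v = fr' ++ (Qtail ++ pvSucc G L R M v) by simp) rfl _
        (by intro y hy; simp at hy
            rcases hy with hy | hy | hy
            · exact h1 y (by simp [hy])
            · exact h1 y (by simp [hy])
            · exact pvSucc_mem_univ G L R M v hy)) ?_
      refine Eq.trans (ih (Qtail ++ pvSucc G L R M v) (vis ++ [v]) (PySem.Set.add seen v) hseen' _
        (by intro y hy; simp at hy
            rcases hy with hy | hy | hy
            · exact h2 y (by simp [hy])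
            · exact pvSucc_mem_univ G L R M v hy
            · rcases hy with ⟨u, _, hu⟩
              exact pvSucc_mem_univ G L R M u hu)) ?_
      exact pvAbs_congr G L R M (by simp [pvLayer, hv]) (by simp [pvLayer, hv]) _ _

-- B's round loop equals the abstract traversal
theorem pvRounds_eq_abs (G : List (Int × List Int)) (L R : List Int) (M : List (Int × Int))
    (fr : List Int) (seen : PySem.Set Int) (order : List Int) (hfr)
    (hseen : ∀ x : Int, x ∈ seen ↔ x ∈ order) :
    pvRounds G L R M fr seen order hfr = pvAbs G L R M fr order hfr := by
  match fr with
  | [] => rw [pvRounds, pvAbs]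
  | v :: rest =>
    rw [pvRounds]
    rw [pvRounds_eq_abs G L R M _ _ _ _ (by
      intro x
      rw [pvLayer_mem_snd]
      simp only [List.mem_append]
      rw [hseen x])]
    have := pvAbs_round G L R M (v :: rest) [] order seen hseen
      (by intro y hy; apply hfr y; simpa using hy)
      (by
        intro y hy
        simp at hy
        rcases hy with ⟨u, _, hu⟩
        exact pvSucc_mem_univ G L R M u hu)
    rw [pvAbs_congr G L R M (show v :: rest = (v :: rest) ++ [] by simp) rfl hfr
          (by intro y hy; apply hfr y; simpa using hy), this]
    exact pvAbs_congr G L R M (by simp) rfl _ _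
  termination_by ((pvUniv G L M).countP (fun x => !decide (x ∈ seen)), fr.length)
  decreasing_by
    by_cases hnil : (pvLayer seen (v :: rest)).1 = []
    · have hc : ((pvUniv G L M).countP (fun x => !decide (x ∈ (pvLayer seen (v :: rest)).2)))
          = ((pvUniv G L M).countP (fun x => !decide (x ∈ seen))) := by
        apply List.countP_congr
        intro x _
        have := pvLayer_mem_snd seen (v :: rest) x
        rw [hnil] at this
        simp at this
        simp [this]
      rw [hc, hnil]
      exact Prod.Lex.right _ (by simp)
    · obtain ⟨w, hw1⟩ := List.exists_mem_of_ne_nil _ hnil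
      apply Prod.Lex.left
      have hw2 := pvLayer_fst_subset seen (v :: rest) w hw1
      exact pv_countP_strict (q := fun x => !decide (x ∈ (pvLayer seen (v :: rest)).2))
        (by
          intro x hx
          simp only [Bool.not_eq_true', decide_eq_false_iff_not] at hx ⊢
          intro hs
          exact hx (((pvLayer_mem_snd seen (v :: rest) x).2 (Or.inl hs))))
        (hfr w hw2.1) (by simpa using hw2.2)
        (by simp [(pvLayer_mem_snd seen (v :: rest) w).2 (Or.inr hw1)])

-- ===== VERDICT (by name: the statement is the Claim_ definition above) =====
theorem alternatingBFS_spec : Claim_equal_alternatingBFS := by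
  intro G L R M _ _
  show alternatingBFS G L R M = alternatingBFS_alt G L R M
  unfold alternatingBFS alternatingBFS_alt
  rw [pvLoopA_eq_abs G L R M _ [] [] _ _ (by intro x hx; cases hx)]
  rw [pvRounds_eq_abs G L R M _ _ _ _ (by intro x; simp [PySem.Set.empty])]
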